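-- pv_equiv track=rewrite | github.com/lmgame-org/GamingAgent | games/tetris/workers.py | rotate_shape_about_pivot
-- ===== SOURCE A (Python) =====
-- def rotate_shape_about_pivot(matrix, pivot):
--     """
--     Rotate the shape (matrix) 90° clockwise about the given pivot.
--     The pivot is given as a coordinate (row, col) relative to the matrix.
--     Returns a tuple: (new_matrix, new_pivot) where new_matrix is the rotated shape
--     in a minimal bounding box and new_pivot is the pivot's coordinate in that new matrix.
--     """
--     coords = []
--     for i, row in enumerate(matrix):
--         for j, cell in enumerate(row):
--             if cell:
--                 coords.append((i, j))
--     new_coords = []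
--     pr, pc = pivot
--     for (i, j) in coords:
--         # Compute offset from pivot.
--         off_i = i - pr
--         off_j = j - pc
--         # Rotate offset: (off_i, off_j) -> (off_j, -off_i)
--         new_i = pr + off_j
--         new_j = pc - off_i
--         new_coords.append((new_i, new_j))
--     # Re-normalize: shift so that the minimal coordinate becomes (0,0).
--     min_i = min(i for i, j in new_coords)
--     min_j = min(j for i, j in new_coords)
--     normalized = {(i - min_i, j - min_j) for (i, j) in new_coords}
--     # The new pivot in the normalized coordinates.
--     new_pivot = (pivot[0] - min_i, pivot[1] - min_j)
--     # Build the new matrix.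
--     max_i = max(i for i, j in normalized)
--     max_j = max(j for i, j in normalized)
--     new_matrix = [[0]*(max_j+1) for _ in range(max_i+1)]
--     for (i, j) in normalized:
--         new_matrix[i][j] = 1
--     return new_matrix, new_pivot
-- ===== SOURCE B (Python) =====
-- def rotate_shape_about_pivot(matrix, pivot):
--     """
--     Rotate the shape (matrix) 90 degrees clockwise about the given pivot.
--     Returns (new_matrix, new_pivot) with the rotated shape in a minimal
--     bounding box. Single bounding-box pass plus one direct-fill pass.
--     """
--     imin = jmin = imax = jmax = None
--     for i, row in enumerate(matrix):
--         for j, cell in enumerate(row):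
--             if cell:
--                 if imin is None:
--                     imin, imax, jmin, jmax = i, i, j, j
--                 else:
--                     imax = i
--                     if j < jmin:
--                         jmin = j
--                     if j > jmax:
--                         jmax = j
--     if imin is None:
--         raise ValueError("shape has no filled cells")
--     new_matrix = [[0] * (imax - imin + 1) for _ in range(jmax - jmin + 1)]
--     for i, row in enumerate(matrix):
--         for j, cell in enumerate(row):
--             if cell:
--                 new_matrix[j - jmin][imax - i] = 1
--     return new_matrix, (pivot[1] - jmin, imax - pivot[0])
-- ===== Notes on version B (the rewrite author's own statement) =====
-- stated objective: simpler
-- what changed: B replaces A's five-pass pipeline (collect coordinate list, rotate each offset, two min scans, build a normalized set, two max scans, then fill) by one bounding-box scan of the matrix and one direct fill pass using the closed-form clockwise mapping (i,j) -> (j-jmin, imax-i), with no intermediate coordinate list or set.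
import Mathlib
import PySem

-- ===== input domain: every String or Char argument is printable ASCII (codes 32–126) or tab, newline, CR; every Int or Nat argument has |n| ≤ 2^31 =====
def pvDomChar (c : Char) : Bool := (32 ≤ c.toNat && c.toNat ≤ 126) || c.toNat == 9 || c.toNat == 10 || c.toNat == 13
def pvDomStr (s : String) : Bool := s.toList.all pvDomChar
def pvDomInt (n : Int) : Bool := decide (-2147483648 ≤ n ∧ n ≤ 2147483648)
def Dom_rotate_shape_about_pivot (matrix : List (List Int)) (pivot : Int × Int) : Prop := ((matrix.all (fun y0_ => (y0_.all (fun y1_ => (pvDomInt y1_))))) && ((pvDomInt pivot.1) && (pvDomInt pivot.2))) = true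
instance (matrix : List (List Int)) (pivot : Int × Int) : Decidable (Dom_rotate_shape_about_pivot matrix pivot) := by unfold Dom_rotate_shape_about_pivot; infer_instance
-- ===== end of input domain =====

-- B replaces A's rotate-list/renormalize-set pipeline by a bounding-box pass and a direct closed-form
-- fill pass (simpler decomposition); return-value equivalence proved on shapes with ≥ 1 filled cell.

-- ===== PORT A =====
def rotate_shape_about_pivot (matrix : List (List Int)) (pivot : Int × Int) : List (List Int) × (Int × Int) :=
  let coords : List (Int × Int) :=
    (PySem.List.enumerate matrix).foldl (fun acc ir =>
      (PySem.List.enumerate ir.2).foldl (fun acc jc =>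
        if jc.2 ≠ 0 then acc ++ [(ir.1, jc.1)] else acc) acc) []
  let pr := pivot.1
  let pc := pivot.2
  let new_coords : List (Int × Int) :=
    coords.foldl (fun acc p => acc ++ [(pr + (p.2 - pc), pc - (p.1 - pr))]) []
  -- min()/max() on an empty sequence raise ValueError: Pre_ excludes all-zero shapes, so .getD 0 is never taken there
  let min_i := (PySem.List.min? (new_coords.map (fun p => p.1)) (fun x => x)).getD 0
  let min_j := (PySem.List.min? (new_coords.map (fun p => p.2)) (fun x => x)).getD 0
  let normalized : PySem.Set (Int × Int) :=
    PySem.Set.ofList (new_coords.map (fun p => (p.1 - min_i, p.2 - min_j)))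
  let new_pivot := (pivot.1 - min_i, pivot.2 - min_j)
  let max_i := (PySem.List.max? (normalized.map (fun p => p.1)) (fun x => x)).getD 0
  let max_j := (PySem.List.max? (normalized.map (fun p => p.2)) (fun x => x)).getD 0
  let new_matrix0 := (PySem.List.pyRange 0 (max_i + 1) 1).map (fun _ => PySem.List.pyRepeat [0] (max_j + 1))
  -- for (i, j) in normalized: new_matrix[i][j] = 1  (all indices in range under Pre_, so pySetD/pyGetD are exact;
  -- the assignments hit pairwise-distinct cells with the same value, so the set's iteration order cannot matter)
  let new_matrix := normalized.foldl (fun m p =>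
    PySem.List.pySetD m p.1 (PySem.List.pySetD (PySem.List.pyGetD m p.1 []) p.2 1)) new_matrix0
  (new_matrix, new_pivot)

-- ===== PORT B =====
-- the 'if imin is None: … else: …' update block of B's bounding-box loop
def pvStep (st : Option (Int × Int × Int × Int)) (i j : Int) : Option (Int × Int × Int × Int) :=
  match st with
  | none => some (i, i, j, j)
  | some (imin, _, jmin, jmax) =>
      some (imin, i, (if j < jmin then j else jmin), (if jmax < j then j else jmax))

def rotate_shape_about_pivot_alt (matrix : List (List Int)) (pivot : Int × Int) : List (List Int) × (Int × Int) :=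
  let bbox := (PySem.List.enumerate matrix).foldl (fun st ir =>
      (PySem.List.enumerate ir.2).foldl (fun st jc =>
        if jc.2 ≠ 0 then pvStep st ir.1 jc.1 else st) st) none
  match bbox with
  | none => ([], (0, 0))   -- Python B raises ValueError here; excluded by Pre_
  | some (imin, imax, jmin, jmax) =>
      let new_matrix0 := (PySem.List.pyRange 0 (jmax - jmin + 1) 1).map (fun _ =>
        PySem.List.pyRepeat [0] (imax - imin + 1))
      -- new_matrix[j - jmin][imax - i] = 1 (indices provably in range under Pre_, so pySetD/pyGetD are exact)
      let new_matrix := (PySem.List.enumerate matrix).foldl (fun m ir =>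
        (PySem.List.enumerate ir.2).foldl (fun m jc =>
          if jc.2 ≠ 0 then
            PySem.List.pySetD m (jc.1 - jmin)
              (PySem.List.pySetD (PySem.List.pyGetD m (jc.1 - jmin) []) (imax - ir.1) 1)
          else m) m) new_matrix0
      (new_matrix, (pivot.2 - jmin, imax - pivot.1))

-- ===== PRECONDITION & SPEC =====
-- Pre_ excludes exactly the shapes with no filled (nonzero) cell: there A's min() raises ValueError (B raises too).
def Pre_rotate_shape_about_pivot (matrix : List (List Int)) (pivot : Int × Int) : Prop :=
  (matrix.any (fun row => row.any (fun c => c != 0))) = true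
instance (matrix : List (List Int)) (pivot : Int × Int) : Decidable (Pre_rotate_shape_about_pivot matrix pivot) := by unfold Pre_rotate_shape_about_pivot; infer_instance

def pvWitness_rotate_shape_about_pivot : List (List Int) × (Int × Int) := ([[0, 1], [1, 1]], (0, 1))

def Spec_rotate_shape_about_pivot (matrix : List (List Int)) (pivot : Int × Int) (out : List (List Int) × (Int × Int)) : Prop := out = rotate_shape_about_pivot_alt matrix pivot
instance (matrix : List (List Int)) (pivot : Int × Int) (out : List (List Int) × (Int × Int)) : Decidable (Spec_rotate_shape_about_pivot matrix pivot out) := by unfold Spec_rotate_shape_about_pivot; infer_instance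

-- ===== CLAIM (what is proved, stated in full; the proofs are below) =====
def Claim_equal_rotate_shape_about_pivot : Prop := ∀ (matrix : List (List Int)) (pivot : Int × Int), Dom_rotate_shape_about_pivot matrix pivot → Pre_rotate_shape_about_pivot matrix pivot → Spec_rotate_shape_about_pivot matrix pivot (rotate_shape_about_pivot matrix pivot)

-- ===== LEMMAS AND PROOFS =====

-- the filled cells of one enumerated row, as (row index, column index) pairs
def pvChunk (i : Int) (row : List Int) : List (Int × Int) :=
  ((PySem.List.enumerate row).filter (fun jc => decide (jc.2 ≠ 0))).map (fun jc => (i, jc.1))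

-- all filled cells of the matrix, in raster order (what A's first loop collects)
def pvCoords (matrix : List (List Int)) : List (Int × Int) :=
  (PySem.List.enumerate matrix).flatMap (fun ir => pvChunk ir.1 ir.2)

-- both ports' nested "for i,row / for j,cell / if cell" loops are a fold over pvCoords
theorem pv_nestfold {α : Type} (matrix : List (List Int)) (f : α → Int × Int → α) (a : α) :
    (PySem.List.enumerate matrix).foldl (fun a ir =>
      (PySem.List.enumerate ir.2).foldl (fun a jc =>
        if jc.2 ≠ 0 then f a (ir.1, jc.1) else a) a) a
    = (pvCoords matrix).foldl f a := by
  unfold pvCoords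
  rw [List.foldl_flatMap]
  refine PySem.List.foldl_congr_mem _ _ _ _ ?_
  intro acc ir _
  rw [PySem.List.foldl_ite_eq_foldl_filter (p := fun jc : Int × Int => jc.2 ≠ 0)
    (f := fun a jc => f a (ir.1, jc.1))]
  unfold pvChunk
  rw [List.foldl_map]

theorem pv_coords_build (matrix : List (List Int)) :
    (PySem.List.enumerate matrix).foldl (fun acc ir =>
      (PySem.List.enumerate ir.2).foldl (fun acc jc =>
        if jc.2 ≠ 0 then acc ++ [(ir.1, jc.1)] else acc) acc) []
    = pvCoords matrix := by
  rw [pv_nestfold matrix (fun acc p => acc ++ [p]) [],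
    PySem.List.foldl_append_singleton_eq_self]
  rfl

theorem pv_mem_chunk (i : Int) (row : List Int) (x : Int × Int) (h : x ∈ pvChunk i row) : x.1 = i := by
  unfold pvChunk at h
  simp only [List.mem_map] at h
  obtain ⟨jc, _, rfl⟩ := h
  rfl

theorem pv_chunk_pairwise (i : Int) (row : List Int) :
    (pvChunk i row).Pairwise (fun p q => p.1 = q.1 ∧ p.2 < q.2) := by
  unfold pvChunk
  rw [List.pairwise_map]
  exact ((PySem.List.pairwise_lt_enumerate row 0).filter _).imp (fun h => ⟨rfl, h⟩)

theorem pv_coords_pairwise (matrix : List (List Int)) :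
    (pvCoords matrix).Pairwise (fun p q => p.1 < q.1 ∨ (p.1 = q.1 ∧ p.2 < q.2)) := by
  unfold pvCoords
  rw [List.pairwise_flatMap]
  constructor
  · intro ir _
    exact (pv_chunk_pairwise ir.1 ir.2).imp (fun h => Or.inr h)
  · refine (PySem.List.pairwise_lt_enumerate matrix 0).imp ?_
    intro a b hab x hx y hy
    left
    rw [pv_mem_chunk a.1 a.2 x hx, pv_mem_chunk b.1 b.2 y hy]
    exact hab

theorem pv_coords_nodup (matrix : List (List Int)) : (pvCoords matrix).Nodup := by
  refine (pv_coords_pairwise matrix).imp ?_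
  intro a b h
  rcases h with h | ⟨_, h⟩ <;> exact fun e => by simp [e] at h

theorem pv_coords_mono (matrix : List (List Int)) :
    (pvCoords matrix).Pairwise (fun p q => p.1 ≤ q.1) := by
  refine (pv_coords_pairwise matrix).imp ?_
  intro a b h
  rcases h with h | ⟨h, _⟩ <;> omega

theorem pv_coords_ne_nil (matrix : List (List Int))
    (h : (matrix.any (fun row => row.any (fun c => c != 0))) = true) :
    pvCoords matrix ≠ [] := by
  simp only [List.any_eq_true, bne_iff_ne] at h
  obtain ⟨row, hrow, c, hc, hne⟩ := h
  obtain ⟨k, hk, rfl⟩ := List.mem_iff_getElem.mp hrow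
  obtain ⟨l, hl, rfl⟩ := List.mem_iff_getElem.mp hc
  have hmem : ((k : Int), (l : Int)) ∈ pvCoords matrix := by
    unfold pvCoords
    rw [List.mem_flatMap]
    refine ⟨((k : Int), matrix[k]), ?_, ?_⟩
    · rw [PySem.List.mem_enumerate_iff]
      exact ⟨k, hk, by simp⟩
    · unfold pvChunk
      rw [List.mem_map]
      refine ⟨((l : Int), matrix[k][l]), ?_, rfl⟩
      rw [List.mem_filter]
      refine ⟨?_, by simpa using hne⟩
      rw [PySem.List.mem_enumerate_iff]
      exact ⟨l, hl, by simp⟩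
  exact List.ne_nil_of_mem hmem

-- running min/max under an affine map
theorem pv_foldl_min_add (l : List Int) (c x : Int) :
    (l.map (fun y => c + y)).foldl min (c + x) = c + l.foldl min x := by
  induction l generalizing x with
  | nil => rfl
  | cons y t ih =>
    simp only [List.map_cons, List.foldl_cons]
    have h : min (c + x) (c + y) = c + min x y := by omega
    rw [h]; exact ih _

theorem pv_foldl_min_sub (l : List Int) (c x : Int) :
    (l.map (fun y => c - y)).foldl min (c - x) = c - l.foldl max x := by
  induction l generalizing x with
  | nil => rfl
  | cons y t ih =>
    simp only [List.map_cons, List.foldl_cons]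
    have h : min (c - x) (c - y) = c - max x y := by omega
    rw [h]; exact ih _

theorem pv_foldl_max_sub (l : List Int) (c x : Int) :
    (l.map (fun y => c - y)).foldl max (c - x) = c - l.foldl min x := by
  induction l generalizing x with
  | nil => rfl
  | cons y t ih =>
    simp only [List.map_cons, List.foldl_cons]
    have h : max (c - x) (c - y) = c - min x y := by omega
    rw [h]; exact ih _

-- B's bounding-box fold, once started
theorem pv_step_fold (t : List (Int × Int)) (a b c d : Int) :
    t.foldl (fun st p => pvStep st p.1 p.2) (some (a, b, c, d))
    = some (a, (t.map (fun p => p.1)).foldl (fun _ x => x) b,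
              (t.map (fun p => p.2)).foldl min c,
              (t.map (fun p => p.2)).foldl max d) := by
  induction t generalizing b c d with
  | nil => rfl
  | cons p t ih =>
    rw [List.foldl_cons]
    have hstep : pvStep (some (a, b, c, d)) p.1 p.2 = some (a, p.1, min c p.2, max d p.2) := by
      have h1 : (if p.2 < c then p.2 else c) = min c p.2 := by
        simp only [min_def]; split_ifs <;> omega
      have h2 : (if d < p.2 then p.2 else d) = max d p.2 := by
        simp only [max_def]; split_ifs <;> omega
      simp [pvStep, h1, h2]
    rw [hstep, ih]
    simp only [List.map_cons, List.foldl_cons]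

theorem pv_last_eq_max (l : List Int) (b : Int) (h : (b :: l).Pairwise (· ≤ ·)) :
    l.foldl (fun _ x => x) b = l.foldl max b := by
  induction l generalizing b with
  | nil => rfl
  | cons x t ih =>
    rw [List.pairwise_cons] at h
    have hbx : b ≤ x := h.1 x (by simp)
    simp only [List.foldl_cons, max_eq_right hbx]
    exact ih x h.2

theorem pv_foldl_min_const (l : List Int) (b : Int) (h : ∀ x ∈ l, b ≤ x) :
    l.foldl min b = b := by
  induction l with
  | nil => rfl
  | cons x t ih =>
    simp only [List.foldl_cons, min_eq_left (h x (by simp))]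
    exact ih (fun y hy => h y (by simp [hy]))

-- extra affine-fold lemma: running max of (y - c)
theorem pv_foldl_max_sub_const (l : List Int) (c x : Int) :
    (l.map (fun y => y - c)).foldl max (x - c) = l.foldl max x - c := by
  induction l generalizing x with
  | nil => rfl
  | cons y t ih =>
    simp only [List.map_cons, List.foldl_cons]
    have h : max (x - c) (y - c) = max x y - c := by omega
    rw [h]; exact ih _

-- the common closed form both ports are shown to equal (q :: t enumerates the filled cells)
def pvCanon (pivot : Int × Int) (q : Int × Int) (t : List (Int × Int)) : List (List Int) × (Int × Int) :=
  ((q :: t).foldl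
     (fun m p => PySem.List.pySetD m (p.2 - (t.map (fun p => p.2)).foldl min q.2)
        (PySem.List.pySetD (PySem.List.pyGetD m (p.2 - (t.map (fun p => p.2)).foldl min q.2) [])
          ((t.map (fun p => p.1)).foldl max q.1 - p.1) 1))
     ((PySem.List.pyRange 0 ((t.map (fun p => p.2)).foldl max q.2 - (t.map (fun p => p.2)).foldl min q.2 + 1) 1).map
        (fun _ => PySem.List.pyRepeat [0] ((t.map (fun p => p.1)).foldl max q.1 - (t.map (fun p => p.1)).foldl min q.1 + 1))),
   (pivot.2 - (t.map (fun p => p.2)).foldl min q.2,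
    (t.map (fun p => p.1)).foldl max q.1 - pivot.1))

theorem pv_A_eq (matrix : List (List Int)) (pivot : Int × Int) (q : Int × Int) (t : List (Int × Int))
    (h : pvCoords matrix = q :: t) :
    rotate_shape_about_pivot matrix pivot = pvCanon pivot q t := by
  have hnodup : (q :: t).Nodup := h ▸ pv_coords_nodup matrix
  unfold rotate_shape_about_pivot pvCanon
  rw [pv_coords_build matrix, h]
  dsimp only []
  rw [PySem.List.foldl_append_singleton_eq_map]
  simp only [List.nil_append]
  have e1 : List.map (fun p : Int × Int => p.1)
      (List.map (fun p : Int × Int => (pivot.1 + (p.2 - pivot.2), pivot.2 - (p.1 - pivot.1))) (q :: t))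
      = (pivot.1 - pivot.2 + q.2) :: (List.map (fun p : Int × Int => p.2) t).map (fun y => pivot.1 - pivot.2 + y) := by
    simp only [List.map_map, List.map_cons, Function.comp_def]
    congr 1
    · ring
    · apply List.map_congr_left
      intro p _
      ring
  rw [e1, PySem.List.min?_id_cons, pv_foldl_min_add, Option.getD_some]
  have e2 : List.map (fun p : Int × Int => p.2)
      (List.map (fun p : Int × Int => (pivot.1 + (p.2 - pivot.2), pivot.2 - (p.1 - pivot.1))) (q :: t))
      = (pivot.2 + pivot.1 - q.1) :: (List.map (fun p : Int × Int => p.1) t).map (fun y => pivot.2 + pivot.1 - y) := by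
    simp only [List.map_map, List.map_cons, Function.comp_def]
    congr 1
    · ring
    · apply List.map_congr_left
      intro p _
      ring
  rw [e2, PySem.List.min?_id_cons, pv_foldl_min_sub, Option.getD_some]
  have e3 : List.map (fun p : Int × Int =>
        (p.1 - (pivot.1 - pivot.2 + List.foldl min q.2 (List.map (fun p => p.2) t)),
         p.2 - (pivot.2 + pivot.1 - List.foldl max q.1 (List.map (fun p => p.1) t))))
      (List.map (fun p : Int × Int => (pivot.1 + (p.2 - pivot.2), pivot.2 - (p.1 - pivot.1))) (q :: t))
      = List.map (fun p : Int × Int =>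
          (p.2 - List.foldl min q.2 (List.map (fun p => p.2) t),
           List.foldl max q.1 (List.map (fun p => p.1) t) - p.1)) (q :: t) := by
    simp only [List.map_map]
    apply List.map_congr_left; intro p _
    simp only [Function.comp, Prod.ext_iff]
    constructor <;> dsimp only [] <;> ring
  rw [e3]
  have hginj : Function.Injective (fun p : Int × Int =>
      (p.2 - List.foldl min q.2 (List.map (fun p => p.2) t),
       List.foldl max q.1 (List.map (fun p => p.1) t) - p.1)) := by
    intro a b hab
    simp only [Prod.mk.injEq] at hab
    exact Prod.ext (by omega) (by omega)
  rw [PySem.Set.ofList_eq_self_of_nodup _ (List.Nodup.map hginj hnodup)]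
  have e4 : List.map (fun p : Int × Int => p.1)
      (List.map (fun p : Int × Int =>
          (p.2 - List.foldl min q.2 (List.map (fun p => p.2) t),
           List.foldl max q.1 (List.map (fun p => p.1) t) - p.1)) (q :: t))
      = (q.2 - List.foldl min q.2 (List.map (fun p => p.2) t)) ::
        (List.map (fun p : Int × Int => p.2) t).map (fun y => y - List.foldl min q.2 (List.map (fun p => p.2) t)) := by
    simp only [List.map_map, List.map_cons, Function.comp_def]
  rw [e4, PySem.List.max?_id_cons, pv_foldl_max_sub_const, Option.getD_some]
  have e5 : List.map (fun p : Int × Int => p.2)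
      (List.map (fun p : Int × Int =>
          (p.2 - List.foldl min q.2 (List.map (fun p => p.2) t),
           List.foldl max q.1 (List.map (fun p => p.1) t) - p.1)) (q :: t))
      = (List.foldl max q.1 (List.map (fun p => p.1) t) - q.1) ::
        (List.map (fun p : Int × Int => p.1) t).map (fun y => List.foldl max q.1 (List.map (fun p => p.1) t) - y) := by
    simp only [List.map_map, List.map_cons, Function.comp_def]
  rw [e5, PySem.List.max?_id_cons, pv_foldl_max_sub, Option.getD_some]
  rw [List.foldl_map]
  have harith : ∀ J I : Int,
      ((pivot.1 - (pivot.1 - pivot.2 + J), pivot.2 - (pivot.2 + pivot.1 - I)) : Int × Int)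
        = (pivot.2 - J, I - pivot.1) := by
    intro J I
    exact Prod.ext (by ring) (by ring)
  rw [harith]

theorem pv_B_eq (matrix : List (List Int)) (pivot : Int × Int) (q : Int × Int) (t : List (Int × Int))
    (h : pvCoords matrix = q :: t) :
    rotate_shape_about_pivot_alt matrix pivot = pvCanon pivot q t := by
  have hmono : (q :: t).Pairwise (fun p p' : Int × Int => p.1 ≤ p'.1) := h ▸ pv_coords_mono matrix
  have hforall : ∀ x ∈ List.map (fun p : Int × Int => p.1) t, q.1 ≤ x := by
    intro x hx
    obtain ⟨p, hp, rfl⟩ := List.mem_map.mp hx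
    exact (List.pairwise_cons.mp hmono).1 p hp
  have hchain : (q.1 :: List.map (fun p : Int × Int => p.1) t).Pairwise (· ≤ ·) := by
    have h2 : (List.map (fun p : Int × Int => p.1) (q :: t)).Pairwise (· ≤ ·) :=
      List.pairwise_map.mpr hmono
    simpa using h2
  unfold rotate_shape_about_pivot_alt pvCanon
  have hb : (PySem.List.enumerate matrix).foldl (fun st ir =>
      (PySem.List.enumerate ir.2).foldl (fun st jc =>
        if jc.2 ≠ 0 then pvStep st ir.1 jc.1 else st) st) (none : Option (Int × Int × Int × Int))
      = (pvCoords matrix).foldl (fun st p => pvStep st p.1 p.2) none :=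
    pv_nestfold matrix (fun st p => pvStep st p.1 p.2) none
  rw [hb, h, List.foldl_cons]
  have hinit : pvStep none q.1 q.2 = some (q.1, q.1, q.2, q.2) := rfl
  rw [hinit, pv_step_fold t q.1 q.1 q.2 q.2]
  dsimp only []
  rw [pv_last_eq_max (List.map (fun p : Int × Int => p.1) t) q.1 hchain]
  rw [pv_foldl_min_const (List.map (fun p : Int × Int => p.1) t) q.1 hforall]
  have hfill :
      List.foldl
        (fun m ir =>
          List.foldl
            (fun m jc =>
              if jc.2 ≠ 0 then
                PySem.List.pySetD m (jc.1 - List.foldl min q.2 (List.map (fun p : Int × Int => p.2) t))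
                  (PySem.List.pySetD (PySem.List.pyGetD m (jc.1 - List.foldl min q.2 (List.map (fun p : Int × Int => p.2) t)) [])
                    (List.foldl max q.1 (List.map (fun p : Int × Int => p.1) t) - ir.1) 1)
              else m)
            m (PySem.List.enumerate ir.2))
        (List.map (fun _ => PySem.List.pyRepeat ([0] : List Int) (List.foldl max q.1 (List.map (fun p : Int × Int => p.1) t) - q.1 + 1))
          (PySem.List.pyRange 0 (List.foldl max q.2 (List.map (fun p : Int × Int => p.2) t) - List.foldl min q.2 (List.map (fun p : Int × Int => p.2) t) + 1) 1))
        (PySem.List.enumerate matrix)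
      = List.foldl
          (fun m p => PySem.List.pySetD m (p.2 - List.foldl min q.2 (List.map (fun p : Int × Int => p.2) t))
            (PySem.List.pySetD (PySem.List.pyGetD m (p.2 - List.foldl min q.2 (List.map (fun p : Int × Int => p.2) t)) [])
              (List.foldl max q.1 (List.map (fun p : Int × Int => p.1) t) - p.1) 1))
          (List.map (fun _ => PySem.List.pyRepeat ([0] : List Int) (List.foldl max q.1 (List.map (fun p : Int × Int => p.1) t) - q.1 + 1))
          (PySem.List.pyRange 0 (List.foldl max q.2 (List.map (fun p : Int × Int => p.2) t) - List.foldl min q.2 (List.map (fun p : Int × Int => p.2) t) + 1) 1))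
          (pvCoords matrix) :=
    pv_nestfold matrix
      (fun m p => PySem.List.pySetD m (p.2 - List.foldl min q.2 (List.map (fun p : Int × Int => p.2) t))
            (PySem.List.pySetD (PySem.List.pyGetD m (p.2 - List.foldl min q.2 (List.map (fun p : Int × Int => p.2) t)) [])
              (List.foldl max q.1 (List.map (fun p : Int × Int => p.1) t) - p.1) 1))
      (List.map (fun _ => PySem.List.pyRepeat ([0] : List Int) (List.foldl max q.1 (List.map (fun p : Int × Int => p.1) t) - q.1 + 1))
          (PySem.List.pyRange 0 (List.foldl max q.2 (List.map (fun p : Int × Int => p.2) t) - List.foldl min q.2 (List.map (fun p : Int × Int => p.2) t) + 1) 1))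
  exact congrArg₂ Prod.mk (hfill.trans (congrArg _ h)) rfl

-- ===== VERDICT (by name: the statement is the Claim_ definition above) =====
theorem rotate_shape_about_pivot_spec : Claim_equal_rotate_shape_about_pivot := by
  intro matrix pivot _ hpre
  unfold Spec_rotate_shape_about_pivot
  obtain ⟨q, t, h⟩ := List.exists_cons_of_ne_nil (pv_coords_ne_nil matrix hpre)
  rw [pv_A_eq matrix pivot q t h, pv_B_eq matrix pivot q t h]
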